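-- pv_equiv track=rewrite | github.com/IKNOWINOT/Murphy-System | Murphy System/archive/legacy_versions/murphy_complete_system_package/murphy_runtime/integrated_module_system.py | _extract_command_examples
-- ===== SOURCE A (Python) =====
-- from typing import Dict, List, Optional, Any, Tuple
--
-- def _extract_command_examples(docstring: str, cmd_name: str) -> List[str]:
--     """Extract command usage examples"""
--     examples = []
--
--     if not docstring:
--         return examples
--
--     # Look for "Examples:" or "Usage:" section
--     lines = docstring.split("\n")
--     in_examples = False
--
--     for line in lines:
--         line = line.strip()
--
--         if line.lower().startswith("examples:") or line.lower().startswith("usage:"):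
--             in_examples = True
--             continue
--
--         if in_examples:
--             if line.startswith("-") or line.startswith("*"):
--                 example = line.lstrip("-*").strip()
--                 if example.startswith("/"):
--                     examples.append(example)
--             elif not line:  # Empty line ends examples section
--                 break
--
--     # If no examples found, generate default example
--     if not examples:
--         examples.append(f"/{cmd_name}")
--
--     return examples
-- ===== SOURCE B (Python) =====
-- from typing import List
--
-- def _extract_command_examples(docstring: str, cmd_name: str) -> List[str]:
--     """Extract command usage examples as a declarative index-arithmetic pipeline:
--     whole-list comprehensions find header/blank indices, then one slice is filtered."""
--     if not docstring:
--         return []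
--
--     lines = [l.strip() for l in docstring.split("\n")]
--
--     headers = [i for i, l in enumerate(lines)
--                if l.lower().startswith(("examples:", "usage:"))]
--     if not headers:
--         return ["/" + cmd_name]
--     h = headers[0]
--
--     blanks = [i for i, l in enumerate(lines) if i > h and not l]
--     e = blanks[0] if blanks else len(lines)
--
--     bullets = [l.lstrip("-*").strip() for l in lines[h + 1:e] if l[:1] in ("-", "*")]
--     examples = [x for x in bullets if x.startswith("/")]
--     return examples or ["/" + cmd_name]
-- ===== Notes on version B (the rewrite author's own statement) =====
-- stated objective: alternative
-- what changed: Replaces A's single stateful loop (in_examples flag, continue/break) with a declarative index-arithmetic pipeline: comprehensions compute the header-index and blank-index lists, the body is extracted as one slice lines[h+1:e], and the examples fall out of a filter/map chain.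
import Mathlib
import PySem

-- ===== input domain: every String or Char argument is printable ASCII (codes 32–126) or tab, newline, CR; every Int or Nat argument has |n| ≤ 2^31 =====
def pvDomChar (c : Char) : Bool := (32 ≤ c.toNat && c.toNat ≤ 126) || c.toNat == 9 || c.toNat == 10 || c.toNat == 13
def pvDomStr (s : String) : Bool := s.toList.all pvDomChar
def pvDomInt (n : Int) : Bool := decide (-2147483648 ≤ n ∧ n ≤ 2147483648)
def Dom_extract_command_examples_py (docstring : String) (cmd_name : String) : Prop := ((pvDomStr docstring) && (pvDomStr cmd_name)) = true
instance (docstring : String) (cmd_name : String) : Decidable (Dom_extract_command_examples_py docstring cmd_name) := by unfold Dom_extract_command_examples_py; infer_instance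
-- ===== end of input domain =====

-- B replaces A's single stateful flag-loop by a declarative pipeline: comprehensions
-- compute header/blank index lists, then one slice is filtered; objective: alternative.


-- ===== PORT A =====

-- line.lower().startswith("examples:") or line.lower().startswith("usage:")
def pvIsHeader (s : List Char) : Bool :=
  PySem.Chars.startswith (PySem.Chars.lower s) "examples:".toList ||
  PySem.Chars.startswith (PySem.Chars.lower s) "usage:".toList

-- line.lstrip("-*") ported by hand: drops exactly the leading characters from the set "-*" (exact)
def pvLstripDashStar (s : List Char) : List Char := s.dropWhile (fun c => c == '-' || c == '*')

-- A's for-loop over the lines, state = (in_examples, examples); 'break' returns the accumulator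
def pvALoop : List (List Char) → Bool → List String → List String
  | [], _, examples => examples
  | l :: rest, inExamples, examples =>
    let line := PySem.Chars.strip l
    if pvIsHeader line then
      pvALoop rest true examples
    else if inExamples then
      if PySem.Chars.startswith line ['-'] || PySem.Chars.startswith line ['*'] then
        let ex := PySem.Chars.strip (pvLstripDashStar line)
        if PySem.Chars.startswith ex ['/'] then
          pvALoop rest inExamples (examples ++ [String.ofList ex])
        else
          pvALoop rest inExamples examples
      else if line = [] then
        examples            -- break
      else
        pvALoop rest inExamples examples
    else
      pvALoop rest inExamples examples

def extract_command_examples_py (docstring : String) (cmd_name : String) : List String :=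
  if docstring = "" then []
  else
    let lines := PySem.Chars.splitOn docstring.toList "\n".toList
    let examples := pvALoop lines false []
    if examples = [] then examples ++ ["/" ++ cmd_name] else examples

-- ===== PORT B =====

def extract_command_examples_py_alt (docstring : String) (cmd_name : String) : List String :=
  if docstring = "" then []
  else
    -- lines = [l.strip() for l in docstring.split("\n")]
    let lines := (PySem.Chars.splitOn docstring.toList "\n".toList).map PySem.Chars.strip
    -- headers = [i for i, l in enumerate(lines) if l.lower().startswith(("examples:", "usage:"))]
    let headers := ((PySem.List.enumerate lines 0).filter (fun p => pvIsHeader p.2)).map (·.1)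
    match headers.head? with
    | none => ["/" ++ cmd_name]
    | some h =>
      -- blanks = [i for i, l in enumerate(lines) if i > h and not l]
      let blanks := ((PySem.List.enumerate lines 0).filter (fun p => h < p.1 && p.2 == ([] : List Char))).map (·.1)
      let e := blanks.head?.getD (lines.length : Int)
      -- bullets = [l.lstrip("-*").strip() for l in lines[h+1:e] if l[:1] in ("-", "*")]
      let bullets := ((PySem.List.slice lines (some (h + 1)) (some e)).filter
          (fun l => PySem.List.slice l none (some 1) == ['-'] || PySem.List.slice l none (some 1) == ['*'])).map
          (fun l => PySem.Chars.strip (pvLstripDashStar l))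
      -- examples = [x for x in bullets if x.startswith("/")]
      let examples := (bullets.filter (fun x => PySem.Chars.startswith x ['/'])).map String.ofList
      if examples = [] then ["/" ++ cmd_name] else examples

-- ===== PRECONDITION & SPEC =====
def Spec_extract_command_examples_py (docstring : String) (cmd_name : String) (out : List String) : Prop := out = extract_command_examples_py_alt docstring cmd_name
instance (docstring : String) (cmd_name : String) (out : List String) : Decidable (Spec_extract_command_examples_py docstring cmd_name out) := by unfold Spec_extract_command_examples_py; infer_instance

-- ===== CLAIM =====
def Claim_equal_extract_command_examples_py : Prop := ∀ (docstring : String) (cmd_name : String), Dom_extract_command_examples_py docstring cmd_name → Spec_extract_command_examples_py docstring cmd_name (extract_command_examples_py docstring cmd_name)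

-- ===== LEMMAS AND PROOFS =====

-- startswith a one-character string tests the head
lemma pvStartswith_single (s : List Char) (c : Char) :
    PySem.Chars.startswith s [c] = (s.head? == some c) := by
  cases s with
  | nil => rfl
  | cons a t =>
    show (c == a && List.isPrefixOf [] t) = _
    simp [List.isPrefixOf, BEq.comm]

-- l[:1] == [c] tests the head too
lemma pvSlice1 (s : List Char) (c : Char) :
    (PySem.List.slice s none (some 1) == [c]) = (PySem.Chars.startswith s [c]) := by
  have h1 : PySem.List.slice s none (some 1) = s.take 1 := by
    have := PySem.List.slice_to_natCast s 1
    simpa using this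
  cases s with
  | nil => simp [h1, pvStartswith_single]
  | cons a t => simp [h1, pvStartswith_single, BEq.comm]

-- a header line is non-empty and is not a bullet line
lemma pvHeader_shape (s : List Char) (h : pvIsHeader s = true) :
    s ≠ [] ∧ s.head? ≠ some '-' ∧ s.head? ≠ some '*' := by
  cases s with
  | nil => simp [pvIsHeader, PySem.Chars.startswith, PySem.Chars.lower] at h
  | cons c cs =>
    refine ⟨by simp, ?_, ?_⟩ <;>
    · simp only [List.head?_cons, Option.some.injEq, ne_eq]
      intro hc; subst hc
      simp [pvIsHeader, PySem.Chars.startswith, PySem.Chars.lower, PySem.Chars.lowerChar,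
        PySem.Chars.isupper, List.isPrefixOf] at h

-- A's loop with the per-line strip factored out (proof-only helper)
def pvALoopS : List (List Char) → Bool → List String → List String
  | [], _, examples => examples
  | line :: rest, inExamples, examples =>
    if pvIsHeader line then
      pvALoopS rest true examples
    else if inExamples then
      if PySem.Chars.startswith line ['-'] || PySem.Chars.startswith line ['*'] then
        let ex := PySem.Chars.strip (pvLstripDashStar line)
        if PySem.Chars.startswith ex ['/'] then
          pvALoopS rest inExamples (examples ++ [String.ofList ex])
        else
          pvALoopS rest inExamples examples
      else if line = [] then
        examples
      else
        pvALoopS rest inExamples examples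
    else
      pvALoopS rest inExamples examples

lemma pvALoop_eq_S (ls : List (List Char)) (b : Bool) (acc : List String) :
    pvALoop ls b acc = pvALoopS (ls.map PySem.Chars.strip) b acc := by
  induction ls generalizing b acc with
  | nil => rfl
  | cons l rest ih =>
    simp only [pvALoop, pvALoopS, List.map_cons]
    split_ifs <;> simp [ih]

-- what the "in_examples" phase of A collects (proof-only helper)
def pvCollectS : List (List Char) → List String
  | [] => []
  | l :: rest =>
    if pvIsHeader l then pvCollectS rest
    else if PySem.Chars.startswith l ['-'] || PySem.Chars.startswith l ['*'] then
      let ex := PySem.Chars.strip (pvLstripDashStar l)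
      if PySem.Chars.startswith ex ['/'] then String.ofList ex :: pvCollectS rest
      else pvCollectS rest
    else if l = [] then []
    else pvCollectS rest

lemma pvALoopS_true (ls : List (List Char)) (acc : List String) :
    pvALoopS ls true acc = acc ++ pvCollectS ls := by
  induction ls generalizing acc with
  | nil => simp [pvALoopS, pvCollectS]
  | cons l rest ih =>
    simp only [pvALoopS, pvCollectS]
    split_ifs <;> simp [ih]

-- before the header, A's loop only searches for it
lemma pvALoopS_false (ls : List (List Char)) (acc : List String) :
    pvALoopS ls false acc =
      match ls.findIdx? pvIsHeader with
      | none => acc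
      | some k => pvALoopS (ls.drop (k + 1)) true acc := by
  induction ls with
  | nil => simp [pvALoopS]
  | cons l rest ih =>
    simp only [pvALoopS, List.findIdx?_cons]
    by_cases h : pvIsHeader l = true
    · simp [h]
    · simp only [h, if_false, Bool.false_eq_true, ih]
      cases hk : rest.findIdx? pvIsHeader <;> simp

-- head of the index comprehension = findIdx? (with an arbitrary enumerate start)
lemma pvEnumHead (pred : List Char → Bool) (T : List (List Char)) (s : Int) :
    ((((PySem.List.enumerate T s).filter (fun p => pred p.2)).map (·.1)).head?) =
      (T.findIdx? pred).map (fun k : Nat => s + k) := by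
  induction T generalizing s with
  | nil => simp [PySem.List.enumerate_nil, List.findIdx?_nil]
  | cons x rest ih =>
    rw [PySem.List.enumerate_cons, List.findIdx?_cons]
    by_cases h : pred x = true
    · simp [h]
    · simp only [List.filter_cons, h, Bool.false_eq_true, if_false, ih]
      cases hk : rest.findIdx? pred with
      | none => simp
      | some k =>
        simp only [Option.map_some]
        congr 1
        push_cast
        ring

-- the "i > h" filter over the whole list reduces to a filter on the dropped tail
lemma pvBlanksHead (S : List (List Char)) (hn : Nat) (hlt : hn < S.length) :
    ((((PySem.List.enumerate S 0).filter
        (fun p => (hn : Int) < p.1 && p.2 == ([] : List Char))).map (·.1)).head?) =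
      ((S.drop (hn + 1)).findIdx? (fun l => l == [])).map (fun k : Nat => ((hn : Int) + 1 + k)) := by
  have hsplit : S = S.take (hn + 1) ++ S.drop (hn + 1) := (List.take_append_drop _ _).symm
  have hlen : (S.take (hn + 1)).length = hn + 1 := by
    rw [List.length_take]; omega
  conv_lhs => rw [hsplit]
  rw [PySem.List.enumerate_append, List.filter_append]
  have h1 : (PySem.List.enumerate (S.take (hn + 1)) 0).filter
      (fun p => (hn : Int) < p.1 && p.2 == ([] : List Char)) = [] := by
    rw [List.filter_eq_nil_iff]
    intro p hp
    obtain ⟨k, hk, rfl⟩ := (PySem.List.mem_enumerate_iff _ _ _).mp hp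
    have : k ≤ hn := by omega
    simp only [Bool.and_eq_true, decide_eq_true_eq]
    intro hcon
    have := hcon.1
    simp only [zero_add] at this
    omega
  rw [h1, List.nil_append, hlen, zero_add]
  have hc : ((hn + 1 : Nat) : Int) = (hn : Int) + 1 := by push_cast; ring
  rw [hc]
  have h2 : (PySem.List.enumerate (S.drop (hn + 1)) ((hn : Int) + 1)).filter
      (fun p => (hn : Int) < p.1 && p.2 == ([] : List Char)) =
      (PySem.List.enumerate (S.drop (hn + 1)) ((hn : Int) + 1)).filter
      (fun p => p.2 == ([] : List Char)) := by
    apply List.filter_congr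
    intro p hp
    obtain ⟨k, hk, rfl⟩ := (PySem.List.mem_enumerate_iff _ _ _).mp hp
    have hdec : decide ((hn : Int) < (hn : Int) + 1 + (k : Int)) = true := by
      simp only [decide_eq_true_eq]; omega
    rw [hdec, Bool.true_and]
  rw [h2]
  exact pvEnumHead (fun l => l == []) _ _

-- cutting at the first blank index is takeWhile
lemma pvTakeFindIdx (T : List (List Char)) :
    (match T.findIdx? (fun l => l == ([] : List Char)) with
      | none => T
      | some k => T.take k) = T.takeWhile (fun l => !l.isEmpty) := by
  induction T with
  | nil => simp [List.findIdx?_nil]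
  | cons l rest ih =>
    rw [List.findIdx?_cons, List.takeWhile_cons]
    by_cases h : (l == ([] : List Char)) = true
    · have hl : l = [] := by simpa using h
      subst hl; simp
    · simp only [Bool.not_eq_true] at h
      rw [h]
      have hie : l.isEmpty = false := by
        cases l with
        | nil => simp at h
        | cons a t => simp
      simp only [Bool.false_eq_true, if_false, hie, Bool.not_false, if_true]
      cases hk : rest.findIdx? (fun l => l == ([] : List Char)) with
      | none =>
        have hh : rest = rest.takeWhile (fun l => !l.isEmpty) := by
          conv_rhs => rw [← ih]
          rw [hk]
        show l :: rest = l :: rest.takeWhile (fun l => !l.isEmpty)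
        rw [← hh]
      | some k =>
        have hh : rest.take k = rest.takeWhile (fun l => !l.isEmpty) := by
          conv_rhs => rw [← ih]
          rw [hk]
        show l :: rest.take k = l :: rest.takeWhile (fun l => !l.isEmpty)
        rw [← hh]

-- the collection phase is B's filter/map pipeline over the blank-cut tail
lemma pvCollectS_eq (T : List (List Char)) :
    pvCollectS T =
      ((((T.takeWhile (fun l => !l.isEmpty)).filter
          (fun l => PySem.List.slice l none (some 1) == ['-'] || PySem.List.slice l none (some 1) == ['*'])).map
          (fun l => PySem.Chars.strip (pvLstripDashStar l))).filter
          (fun x => PySem.Chars.startswith x ['/'])).map String.ofList := by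
  induction T with
  | nil => simp [pvCollectS]
  | cons l rest ih =>
    have hsl : (PySem.List.slice l none (some 1) == ['-'] || PySem.List.slice l none (some 1) == ['*'])
        = (PySem.Chars.startswith l ['-'] || PySem.Chars.startswith l ['*']) := by
      rw [pvSlice1, pvSlice1]
    simp only [pvCollectS, List.takeWhile_cons]
    by_cases hH : pvIsHeader l = true
    · obtain ⟨hne, hd1, hd2⟩ := pvHeader_shape _ hH
      have hb : (PySem.Chars.startswith l ['-'] || PySem.Chars.startswith l ['*']) = false := by
        rw [pvStartswith_single, pvStartswith_single]
        cases hl : l.head? with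
        | none => simp
        | some c => simp_all
      have hempty : l.isEmpty = false := by
        cases l with
        | nil => simp at hne
        | cons a t => simp
      have hcond : (PySem.List.slice l none (some 1) == ['-'] || PySem.List.slice l none (some 1) == ['*']) = false := by
        rw [hsl]; exact hb
      simp [hH, hempty, hcond, ih]
    · by_cases hb : (PySem.Chars.startswith l ['-'] || PySem.Chars.startswith l ['*']) = true
      · have hne : l.isEmpty = false := by
          cases l with
          | nil => simp [pvStartswith_single] at hb
          | cons a t => simp
        have hcond : (PySem.List.slice l none (some 1) == ['-'] || PySem.List.slice l none (some 1) == ['*']) = true := by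
          rw [hsl]; exact hb
        by_cases hS : PySem.Chars.startswith (PySem.Chars.strip (pvLstripDashStar l)) ['/'] = true
        · simp [hH, hb, hne, hcond, hS, ih]
        · simp [hH, hb, hne, hcond, hS, ih]
      · by_cases hne : l = []
        · subst hne
          have h1 : pvIsHeader ([] : List Char) = false := by decide
          have h2 : PySem.Chars.startswith ([] : List Char) ['-'] = false := by decide
          have h3 : PySem.Chars.startswith ([] : List Char) ['*'] = false := by decide
          simp [h1, h2, h3]
        · have hie : l.isEmpty = false := by
            cases l with
            | nil => simp at hne
            | cons a t => simp
          have hb' : (PySem.Chars.startswith l ['-'] || PySem.Chars.startswith l ['*']) = false := by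
            simpa using hb
          have hcond : (PySem.List.slice l none (some 1) == ['-'] || PySem.List.slice l none (some 1) == ['*']) = false := by
            rw [hsl]; exact hb'
          simp [hH, hb', hcond, hie, hne, ih]

-- ===== VERDICT =====
theorem extract_command_examples_py_spec : Claim_equal_extract_command_examples_py := by
  intro docstring cmd_name _
  unfold Spec_extract_command_examples_py extract_command_examples_py extract_command_examples_py_alt
  by_cases hd : docstring = ""
  · simp [hd]
  · simp only [hd, if_false]
    set S := (PySem.Chars.splitOn docstring.toList "\n".toList).map PySem.Chars.strip with hS
    rw [pvALoop_eq_S, ← hS, pvALoopS_false]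
    rw [pvEnumHead pvIsHeader S 0]
    cases hidx : S.findIdx? pvIsHeader with
    | none => simp
    | some hn =>
      have hlt : hn < S.length := (List.findIdx?_eq_some_iff_findIdx_eq.mp hidx).1
      simp only [Option.map_some, zero_add]
      rw [pvALoopS_true, List.nil_append]
      rw [pvBlanksHead S hn hlt]
      have hcast1 : ((hn : Int) + 1) = ((hn + 1 : Nat) : Int) := by push_cast; ring
      cases hblank : (S.drop (hn + 1)).findIdx? (fun l => l == ([] : List Char)) with
      | none =>
        have hslice : PySem.List.slice S (some ((hn : Int) + 1)) (some (S.length : Int)) =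
            S.drop (hn + 1) := by
          rw [hcast1, PySem.List.slice_natCast]
          rw [List.take_of_length_le]
          simp
        have hcut : S.drop (hn + 1) = (S.drop (hn + 1)).takeWhile (fun l => !l.isEmpty) := by
          have := pvTakeFindIdx (S.drop (hn + 1))
          rw [hblank] at this
          simpa using this
        simp only [Option.map_none, Option.getD_none, hslice]
        rw [pvCollectS_eq, ← hcut]
        split_ifs with hify
        · rw [hify]; simp
        · rfl
      | some k =>
        have hslice : PySem.List.slice S (some ((hn : Int) + 1)) (some ((hn : Int) + 1 + k)) =
            (S.drop (hn + 1)).take k := by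
          rw [hcast1]
          have hc2 : ((hn + 1 : Nat) : Int) + (k : Int) = ((hn + 1 + k : Nat) : Int) := by push_cast; ring
          rw [hc2, PySem.List.slice_natCast]
          congr 1
          omega
        have hcut : (S.drop (hn + 1)).take k = (S.drop (hn + 1)).takeWhile (fun l => !l.isEmpty) := by
          have := pvTakeFindIdx (S.drop (hn + 1))
          rw [hblank] at this
          simpa using this
        simp only [Option.map_some, Option.getD_some, hslice]
        rw [pvCollectS_eq, ← hcut]
        split_ifs with hify
        · rw [hify]; simp
        · rfl
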